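-- pv_equiv track=rewrite | github.com/sergehall/Tony-Gaddis-Python-4th | chapter_08/02_sum_of_dig_string.py | sum_str
-- ===== SOURCE A (Python) =====
-- def sum_str(string):
--     sum_string = 0
--     sum_letter = 0
--     letters = ""
--     for ch in string:
--         if ch.isdigit():
--             sum_string += int(ch)
--         if ch.isalpha():
--             letters += ch
--             sum_letter += 1
--
--     return sum_string, sum_letter, letters
-- ===== SOURCE B (Python) =====
-- def sum_str(string):
--     # divide and conquer: combine results of the two halves with a monoid merge
--     if not string:
--         return 0, 0, ""
--     if len(string) == 1:
--         ch = string
--         d = int(ch) if ch.isdigit() else 0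
--         if ch.isalpha():
--             return d, 1, ch
--         return d, 0, ""
--     mid = len(string) // 2
--     s1, c1, l1 = sum_str(string[:mid])
--     s2, c2, l2 = sum_str(string[mid:])
--     return s1 + s2, c1 + c2, l1 + l2
-- ===== Notes on version B (the rewrite author's own statement) =====
-- stated objective: alternative
-- what changed: A's single fused left-to-right loop with three mutable accumulators is replaced by a divide-and-conquer recursion: the string is split in half, each half is solved recursively, and the (sum, count, letters) triples are merged with an associative monoid combine; correctness rests on digit-sum, letter-count and letter-concatenation all being homomorphisms w.r.t. string concatenation.
import Mathlib
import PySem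

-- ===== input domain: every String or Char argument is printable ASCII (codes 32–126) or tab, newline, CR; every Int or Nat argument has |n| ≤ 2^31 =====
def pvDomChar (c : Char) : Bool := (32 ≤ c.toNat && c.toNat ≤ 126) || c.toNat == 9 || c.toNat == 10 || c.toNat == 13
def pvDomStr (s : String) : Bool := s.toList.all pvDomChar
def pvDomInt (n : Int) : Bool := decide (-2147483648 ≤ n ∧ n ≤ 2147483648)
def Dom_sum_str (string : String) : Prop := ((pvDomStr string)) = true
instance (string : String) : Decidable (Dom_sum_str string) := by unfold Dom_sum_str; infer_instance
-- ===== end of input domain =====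

-- B replaces A's single fused accumulator loop by a divide-and-conquer recursion merging half-results (alternative decomposition, same results).


-- ===== PORT A =====
-- one fused loop: three accumulators updated per character
def sum_str (string : String) : Int × Int × String :=
  let r := string.toList.foldl
    (fun (st : Int × Int × List Char) ch =>
      let st := if PySem.Chars.isdigit ch then
          (st.1 + (PySem.Int.ofChars? [ch]).getD 0, st.2.1, st.2.2) else st
      if PySem.Chars.isalpha ch then
          (st.1, st.2.1 + 1, st.2.2 ++ [ch]) else st)
    (0, 0, [])
  (r.1, r.2.1, String.ofList r.2.2)

-- ===== PORT B =====
-- B: divide and conquer — split in half, recurse, merge the triples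
def sumCore (l : List Char) : Int × Int × List Char :=
  if h : l.length ≤ 1 then
    match l with
    | [] => (0, 0, [])
    | ch :: _ =>
      let d : Int := if PySem.Chars.isdigit ch then (PySem.Int.ofChars? [ch]).getD 0 else 0
      if PySem.Chars.isalpha ch then (d, 1, [ch]) else (d, 0, [])
  else
    let m := l.length / 2
    let r1 := sumCore (l.take m)
    let r2 := sumCore (l.drop m)
    (r1.1 + r2.1, r1.2.1 + r2.2.1, r1.2.2 ++ r2.2.2)
termination_by l.length
decreasing_by
  · simp only [List.length_take]; omega
  · simp only [List.length_drop]; omega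

def sum_str_alt (string : String) : Int × Int × String :=
  let r := sumCore string.toList
  (r.1, r.2.1, String.ofList r.2.2)

-- ===== PRECONDITION & SPEC =====
def Spec_sum_str (string : String) (out : Int × Int × String) : Prop := out = sum_str_alt string
instance (string : String) (out : Int × Int × String) : Decidable (Spec_sum_str string out) := by unfold Spec_sum_str; infer_instance

-- ===== CLAIM (what is proved, stated in full; the proofs are below) =====
def Claim_equal_sum_str : Prop := ∀ (string : String), Dom_sum_str string → Spec_sum_str string (sum_str string)

-- ===== LEMMAS AND PROOFS =====
-- the common characterisation both programs compute
def sumSpec (l : List Char) : Int × Int × List Char :=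
  (((l.filter PySem.Chars.isdigit).map
      (fun ch => (PySem.Int.ofChars? [ch]).getD 0)).sum,
   ((l.filter PySem.Chars.isalpha).length : Int),
   l.filter PySem.Chars.isalpha)

lemma sumSpec_append (a b : List Char) :
    sumSpec (a ++ b) =
      ((sumSpec a).1 + (sumSpec b).1, (sumSpec a).2.1 + (sumSpec b).2.1,
       (sumSpec a).2.2 ++ (sumSpec b).2.2) := by
  simp [sumSpec]

lemma sumCore_eq_spec (l : List Char) : sumCore l = sumSpec l := by
  fun_induction sumCore l with
  | case1 => simp [sumSpec]
  | case2 ch tl h d ha =>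
    have : tl = [] := List.eq_nil_of_length_eq_zero (by simp only [List.length_cons] at h; omega)
    subst this
    by_cases hdg : PySem.Chars.isdigit ch <;> simp [d, sumSpec, hdg, ha]
  | case3 ch tl h d ha =>
    have : tl = [] := List.eq_nil_of_length_eq_zero (by simp only [List.length_cons] at h; omega)
    subst this
    by_cases hdg : PySem.Chars.isdigit ch <;> simp [d, sumSpec, hdg, ha]
  | case4 l h m r1 r2 ih1 ih2 =>
    have hsplit : l.take m ++ l.drop m = l := List.take_append_drop m l
    simp only [r1, r2, ih1, ih2]
    conv_rhs => rw [← hsplit]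
    rw [sumSpec_append]

lemma sum_str_loop (l : List Char) (s c : Int) (acc : List Char) :
    l.foldl
      (fun (st : Int × Int × List Char) ch =>
        let st := if PySem.Chars.isdigit ch then
            (st.1 + (PySem.Int.ofChars? [ch]).getD 0, st.2.1, st.2.2) else st
        if PySem.Chars.isalpha ch then
            (st.1, st.2.1 + 1, st.2.2 ++ [ch]) else st)
      (s, c, acc)
    = (s + (sumSpec l).1, c + (sumSpec l).2.1, acc ++ (sumSpec l).2.2) := by
  induction l generalizing s c acc with
  | nil => simp [sumSpec]
  | cons ch tl ih =>
    simp only [List.foldl_cons]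
    by_cases hd : PySem.Chars.isdigit ch <;>
      by_cases ha : PySem.Chars.isalpha ch <;>
        simp [hd, ha, ih, sumSpec] <;> ring_nf <;> simp

-- ===== VERDICT (by name: the statement is the Claim_ definition above) =====
theorem sum_str_spec : Claim_equal_sum_str := by
  intro s _
  unfold Spec_sum_str sum_str sum_str_alt
  simp [sum_str_loop, sumCore_eq_spec]
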